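-- pv_equiv track=rewrite | github.com/Guan831/Postgraduate_period | 2022/algorithm/07.py | function_question_7_3
-- ===== SOURCE A (Python) =====
-- def function_question_7_3(K):
--     K = sorted(K, key=lambda x: x[1])
--     time_K = 0
--     for x in K:
--         time_K += x[0]
--         if time_K > x[1]:
--             return False
--     return True
-- ===== SOURCE B (Python) =====
-- def _feasible(jobs, start):
--     """Divide and conquer: return (feasible, total) where `feasible` says every
--     job in `jobs` (already ordered by deadline) meets its deadline when the
--     machine becomes free at time `start`, and `total` is the sum of the
--     processing times in `jobs`."""
--     if len(jobs) == 0: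
--         return (True, 0)
--     if len(jobs) == 1:
--         t, d = jobs[0]
--         return (start + t <= d, t)
--     m = len(jobs) // 2
--     ok_left, sum_left = _feasible(jobs[:m], start)
--     ok_right, sum_right = _feasible(jobs[m:], start + sum_left)
--     return (ok_left and ok_right, sum_left + sum_right)
--
-- def function_question_7_3(K):
--     return _feasible(sorted(K, key=lambda x: x[1]), 0)[0]
-- ===== Notes on version B (the rewrite author's own statement) =====
-- stated objective: alternative
-- what changed: Replaces A's fused left-to-right accumulate-and-check loop with early return by a divide-and-conquer recursion on the sorted job list that combines (feasible, total processing time) pairs from the two halves.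
import Mathlib
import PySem

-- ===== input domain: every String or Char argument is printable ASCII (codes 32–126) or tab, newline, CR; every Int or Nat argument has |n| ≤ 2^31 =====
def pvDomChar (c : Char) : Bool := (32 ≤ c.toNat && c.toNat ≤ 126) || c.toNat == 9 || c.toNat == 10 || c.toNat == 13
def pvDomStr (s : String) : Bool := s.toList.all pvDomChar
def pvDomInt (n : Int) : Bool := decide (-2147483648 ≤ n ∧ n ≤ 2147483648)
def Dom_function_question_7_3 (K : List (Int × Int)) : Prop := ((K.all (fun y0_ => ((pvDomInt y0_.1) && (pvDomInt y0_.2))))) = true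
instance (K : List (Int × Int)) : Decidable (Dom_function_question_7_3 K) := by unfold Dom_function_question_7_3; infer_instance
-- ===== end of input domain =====

-- B checks feasibility by divide and conquer on the sorted job list, combining (feasible, total time) pairs of the two halves; A uses one fused accumulate-and-check loop with early return. Equal return values proved on all inputs.

-- ===== PORT A =====
-- A's for-loop: running time accumulator, early return False on a missed deadline
def pvLoopA : Int → List (Int × Int) → Bool
  | _, [] => true
  | t, (p, d) :: rest =>
    let t' := t + p
    if t' > d then false else pvLoopA t' rest

def function_question_7_3 (K : List (Int × Int)) : Bool :=
  pvLoopA 0 (PySem.List.sorted K (fun x => x.2) false)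

-- ===== PORT B =====
-- Source B's _feasible(jobs, start): jobs[:m] / jobs[m:] with m = len(jobs)//2 are exactly
-- List.take m / List.drop m (PySem.List.slice_to_natCast / slice_from_natCast, 0 ≤ m ≤ len),
-- and len(jobs)//2 on a Nat length is Nat division (nonnegative, so floor = Euclidean).
def pvFeasible : List (Int × Int) → Int → Bool × Int
  | [], _ => (true, 0)
  | [(t, d)], s => (decide (s + t ≤ d), t)
  | a :: b :: rest, s =>
    let js := a :: b :: rest
    let m := js.length / 2
    let L := pvFeasible (js.take m) s
    let R := pvFeasible (js.drop m) (s + L.2)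
    (L.1 && R.1, L.2 + R.2)
termination_by js _ => js.length
decreasing_by
  · simp; omega
  · simp; omega

def function_question_7_3_alt (K : List (Int × Int)) : Bool :=
  (pvFeasible (PySem.List.sorted K (fun x => x.2) false) 0).1

-- ===== PRECONDITION & SPEC =====
def Spec_function_question_7_3 (K : List (Int × Int)) (out : Bool) : Prop := out = function_question_7_3_alt K
instance (K : List (Int × Int)) (out : Bool) : Decidable (Spec_function_question_7_3 K out) := by unfold Spec_function_question_7_3; infer_instance

-- ===== CLAIM (what is proved, stated in full; the proofs are below) =====
def Claim_equal_function_question_7_3 : Prop := ∀ (K : List (Int × Int)), Dom_function_question_7_3 K → Spec_function_question_7_3 K (function_question_7_3 K)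

-- ===== LEMMAS AND PROOFS =====
-- A's early-return loop splits over an append: the suffix is scanned from the prefix's total time
theorem pvLoopA_append (xs ys : List (Int × Int)) :
    ∀ s : Int, pvLoopA s (xs ++ ys) = (pvLoopA s xs && pvLoopA (s + (xs.map (fun x => x.1)).sum) ys) := by
  induction xs with
  | nil => intro s; simp [pvLoopA]
  | cons hd tl ih =>
    intro s
    obtain ⟨p, d⟩ := hd
    simp only [List.cons_append, pvLoopA, List.map, List.sum_cons]
    by_cases h : s + p > d
    · simp [h]
    · simp only [h, if_false, ih (s + p)]
      ring_nf

-- the divide-and-conquer pass computes A's loop verdict together with the total processing time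
theorem pvFeasible_eq (js : List (Int × Int)) (s : Int) :
    pvFeasible js s = (pvLoopA s js, (js.map (fun x => x.1)).sum) := by
  match js with
  | [] => simp [pvFeasible, pvLoopA]
  | [(t, d)] =>
    simp only [pvFeasible, pvLoopA, List.map, List.sum_cons, List.sum_nil]
    split_ifs with h
    · simp [show ¬ (s + t ≤ d) by omega]
    · simp [show s + t ≤ d by omega]
  | a :: b :: rest =>
    have hlen : (a :: b :: rest).length / 2 < (a :: b :: rest).length := by simp; omega
    have hL := pvFeasible_eq ((a :: b :: rest).take ((a :: b :: rest).length / 2)) s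
    have hR := pvFeasible_eq ((a :: b :: rest).drop ((a :: b :: rest).length / 2))
        (s + ((((a :: b :: rest).take ((a :: b :: rest).length / 2)).map (fun x => x.1)).sum))
    rw [pvFeasible, hL] at *
    simp only [hR]
    have hsplit := List.take_append_drop ((a :: b :: rest).length / 2) (a :: b :: rest)
    conv_rhs => rw [← hsplit]
    rw [pvLoopA_append]
    simp
termination_by js.length
decreasing_by
  · simp; omega
  · simp; omega

-- ===== VERDICT (by name: the statement is the Claim_ definition above) =====
theorem function_question_7_3_spec : Claim_equal_function_question_7_3 := by
  intro K _
  unfold Spec_function_question_7_3 function_question_7_3 function_question_7_3_alt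
  rw [pvFeasible_eq]
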